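-- pv_equiv track=rewrite | github.com/NazimTheAllFather/Floating-Point-Number-Converter-Project | my_tester.py | is_real_number
-- ===== SOURCE A (Python) =====
-- def is_real_number(p_test_string):
--     #The code below is built on the valid integer function discussed in  class
--     valid = True
--     character = ''
--     decimal_point_index = -1
--     length = len(p_test_string)
--
--     #Using an if statement to ensure that users enter at least one character
--     if (length < 1):
--         valid = False
--         return valid
--     else:
--         #if it has more than 1 char, character is given the first element
--         character = p_test_string[0]
--
--     #Detecting leading positive or negative signs
--     if (character == '+' or character == '-') and length >1:
--         p_test_string = p_test_string[1:]
--         #adusting the string length variable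
--         length = len(p_test_string)
--
--     #Determining the index of the radix point
--     for i in range(length):
--         if p_test_string[i] == '.':
--             decimal_point_index = i
--             break
--
--     for i in range(length):
--         #if radix point has been found just continue
--         if i == decimal_point_index:
--             continue
--         #check if character is not within an acceptable number range
--         ord_value = ord(p_test_string[i])
--         if ord_value < 48 or ord_value > 57:
--             valid = False
--             break
--
--     return valid
-- ===== SOURCE B (Python) =====
-- def is_real_number(p_test_string):
--     if not p_test_string:
--         return False
--     s = p_test_string
--     if s[0] in '+-' and len(s) > 1:
--         s = s[1:]
--     parts = s.split('.')
--     if len(parts) > 2: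
--         return False
--     return all('0' <= c <= '9' for part in parts for c in part)
-- ===== Notes on version B (the rewrite author's own statement) =====
-- stated objective: idiomatic
-- what changed: Replaces the two index loops (locate first dot, then scan skipping that index with an ord test) by an optional sign strip, split('.') into at most two parts, and a per-character '0'..'9' check over the parts.
import Mathlib
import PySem

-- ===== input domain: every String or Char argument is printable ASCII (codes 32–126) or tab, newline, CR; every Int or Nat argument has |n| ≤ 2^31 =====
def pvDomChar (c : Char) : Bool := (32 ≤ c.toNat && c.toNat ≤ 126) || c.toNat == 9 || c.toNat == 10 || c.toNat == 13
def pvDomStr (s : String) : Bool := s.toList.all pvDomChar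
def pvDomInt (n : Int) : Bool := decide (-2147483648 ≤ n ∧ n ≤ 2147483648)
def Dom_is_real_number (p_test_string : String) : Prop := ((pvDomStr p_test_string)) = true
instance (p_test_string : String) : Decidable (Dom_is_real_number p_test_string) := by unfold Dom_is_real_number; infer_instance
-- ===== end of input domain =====

-- B validates by stripping an optional sign, splitting on '.' and checking the parts,
-- instead of A's two index loops; proved equal to A on every input (A is total, no Pre_).

-- ===== PORT A =====
-- A-side helpers: A's two 'for i in range(length)' loops as structural recursions over the
-- character list carrying the index i (exact: each iteration reads p_test_string[i]).
def pvFindDot : List Char → Int → Int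
  | [], _ => -1
  | c :: r, i => if c = '.' then i else pvFindDot r (i + 1)

def pvCheckA : List Char → Int → Int → Bool
  | [], _, _ => true
  | c :: r, i, d =>
    if i = d then pvCheckA r (i + 1) d
    else if ((c.toNat : Int) < 48 ∨ (c.toNat : Int) > 57) then false
    else pvCheckA r (i + 1) d

def is_real_number (p_test_string : String) : Bool :=
  let cs := p_test_string.toList
  let length := cs.length
  if length < 1 then false
  else
    let character := cs.headD ' '  -- p_test_string[0] (list nonempty in this branch)
    -- sign strip: p_test_string = p_test_string[1:]
    let cs := if (character = '+' ∨ character = '-') ∧ length > 1 then cs.tail else cs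
    pvCheckA cs 0 (pvFindDot cs 0)

-- ===== PORT B =====
-- Python's s.split('.') transliterated over List Char (gives [''] on the empty string;
-- exact for a one-character separator).
def pvSplitDot : List Char → List (List Char)
  | [] => [[]]
  | c :: r =>
    let p := pvSplitDot r
    if c = '.' then [] :: p
    else (c :: p.headD []) :: p.tail

-- '0' <= c <= '9' (Char order = code-point order, as in Python)
def pvIsDig (c : Char) : Bool := decide ('0' ≤ c) && decide (c ≤ '9')

def is_real_number_alt (p_test_string : String) : Bool :=
  let cs := p_test_string.toList
  if cs.isEmpty then false
  else
    let s := if (cs.headD ' ' = '+' ∨ cs.headD ' ' = '-') ∧ cs.length > 1 then cs.tail else cs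
    let parts := pvSplitDot s
    if parts.length > 2 then false
    else parts.all (fun part => part.all pvIsDig)

-- ===== PRECONDITION & SPEC =====
def Spec_is_real_number (p_test_string : String) (out : Bool) : Prop := out = is_real_number_alt p_test_string
instance (p_test_string : String) (out : Bool) : Decidable (Spec_is_real_number p_test_string out) := by unfold Spec_is_real_number; infer_instance

-- ===== CLAIM (what is proved, stated in full; the proofs are below) =====
def Claim_equal_is_real_number : Prop := ∀ (p_test_string : String), Dom_is_real_number p_test_string → Spec_is_real_number p_test_string (is_real_number p_test_string)

-- ===== LEMMAS AND PROOFS =====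

-- "all characters except the first '.' (if any) are digits"
def pvG : List Char → Bool
  | [] => true
  | c :: r => if c = '.' then r.all pvIsDig else pvIsDig c && pvG r

theorem pvIsDig_eq (c : Char) :
    pvIsDig c = !decide ((c.toNat : Int) < 48 ∨ (c.toNat : Int) > 57) := by
  have h0 : ('0' ≤ c) ↔ 48 ≤ c.toNat := by
    rw [Char.le_def, UInt32.le_iff_toNat_le]; exact Iff.rfl
  have h9 : (c ≤ '9') ↔ c.toNat ≤ 57 := by
    rw [Char.le_def, UInt32.le_iff_toNat_le]; exact Iff.rfl
  simp only [pvIsDig, h0, h9]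
  by_cases a : 48 ≤ c.toNat <;> by_cases b : c.toNat ≤ 57 <;>
    simp [a, b] <;> omega

theorem pvIsDig_false {c : Char} (h : (c.toNat : Int) < 48 ∨ (c.toNat : Int) > 57) :
    pvIsDig c = false := by rw [pvIsDig_eq]; simp; omega

theorem pvIsDig_true {c : Char} (h : ¬ ((c.toNat : Int) < 48 ∨ (c.toNat : Int) > 57)) :
    pvIsDig c = true := by rw [pvIsDig_eq]; simp; omega

theorem pvFindDot_cases (t : List Char) (i : Int) :
    pvFindDot t i = -1 ∨ i ≤ pvFindDot t i := by
  induction t generalizing i with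
  | nil => simp [pvFindDot]
  | cons c r ih =>
    simp only [pvFindDot]
    split
    · omega
    · rcases ih (i + 1) with h | h
      · exact Or.inl h
      · exact Or.inr (by omega)

theorem pvCheckA_noskip (t : List Char) (i d : Int) (h : d < i) :
    pvCheckA t i d = t.all pvIsDig := by
  induction t generalizing i with
  | nil => simp [pvCheckA]
  | cons c r ih =>
    simp only [pvCheckA, List.all_cons]
    rw [if_neg (by omega)]
    by_cases hd : ((c.toNat : Int) < 48 ∨ (c.toNat : Int) > 57)
    · rw [if_pos hd, pvIsDig_false hd]; simp
    · rw [if_neg hd, pvIsDig_true hd, Bool.true_and]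
      exact ih (i + 1) (by omega)

theorem pvCheckA_findDot (t : List Char) (i : Int) (hi : 0 ≤ i) :
    pvCheckA t i (pvFindDot t i) = pvG t := by
  induction t generalizing i with
  | nil => simp [pvCheckA, pvG]
  | cons c r ih =>
    simp only [pvCheckA, pvFindDot, pvG]
    by_cases hc : c = '.'
    · rw [if_pos hc, if_pos hc, if_pos rfl]
      exact pvCheckA_noskip r (i + 1) i (by omega)
    · rw [if_neg hc, if_neg hc]
      have hne : i ≠ pvFindDot r (i + 1) := by
        rcases pvFindDot_cases r (i + 1) with h | h <;> omega
      rw [if_neg hne]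
      by_cases hd : ((c.toNat : Int) < 48 ∨ (c.toNat : Int) > 57)
      · rw [if_pos hd, pvIsDig_false hd]; simp
      · rw [if_neg hd, pvIsDig_true hd, Bool.true_and]
        exact ih (i + 1) (by omega)

theorem pvSplitDot_ne_nil (t : List Char) : pvSplitDot t ≠ [] := by
  cases t with
  | nil => simp [pvSplitDot]
  | cons c r => by_cases hc : c = '.' <;> simp [pvSplitDot, hc]

-- the "no further dot is allowed" half of B equals "all digits"
theorem pvSplitDot_one (t : List Char) :
    (decide ((pvSplitDot t).length ≤ 1) && (pvSplitDot t).all (fun part => part.all pvIsDig))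
      = t.all pvIsDig := by
  induction t with
  | nil => simp [pvSplitDot]
  | cons c r ih =>
    by_cases hc : c = '.'
    · subst hc
      have e : pvSplitDot ('.' :: r) = [] :: pvSplitDot r := by simp [pvSplitDot]
      have h1 : 1 ≤ (pvSplitDot r).length :=
        List.length_pos_iff.mpr (pvSplitDot_ne_nil r)
      have hdot : pvIsDig '.' = false := by decide
      simp [e, show ¬ ((pvSplitDot r).length + 1 ≤ 1) from by omega, hdot]
    · have e : pvSplitDot (c :: r) = (c :: (pvSplitDot r).headD []) :: (pvSplitDot r).tail := by
        simp [pvSplitDot, hc]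
      obtain ⟨hd, tl, he⟩ := List.exists_cons_of_ne_nil (pvSplitDot_ne_nil r)
      rw [he] at e
      simp only [he, List.length_cons, List.all_cons] at ih
      simp only [e, List.headD_cons, List.tail_cons, List.length_cons, List.all_cons]
      rw [← ih]
      cases decide (tl.length + 1 ≤ 1) <;> cases pvIsDig c <;>
        cases hd.all pvIsDig <;> cases tl.all (fun part => part.all pvIsDig) <;> simp

-- B's core check equals pvG
theorem pvSplitDot_g (t : List Char) :
    (if (pvSplitDot t).length > 2 then false
     else (pvSplitDot t).all (fun part => part.all pvIsDig)) = pvG t := by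
  induction t with
  | nil => simp [pvSplitDot, pvG]
  | cons c r ih =>
    by_cases hc : c = '.'
    · have e : pvSplitDot (c :: r) = [] :: pvSplitDot r := by simp [pvSplitDot, hc]
      simp only [e, pvG, if_pos hc]
      rw [← pvSplitDot_one r]
      have h1 : 1 ≤ (pvSplitDot r).length :=
        List.length_pos_iff.mpr (pvSplitDot_ne_nil r)
      by_cases h2 : (pvSplitDot r).length + 1 > 2
      · have h3 : ¬ ((pvSplitDot r).length ≤ 1) := by omega
        simp [h2, h3]
      · have h3 : (pvSplitDot r).length ≤ 1 := by omega
        simp [h2, h3]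
    · have e : pvSplitDot (c :: r) = (c :: (pvSplitDot r).headD []) :: (pvSplitDot r).tail := by
        simp [pvSplitDot, hc]
      obtain ⟨hd, tl, he⟩ := List.exists_cons_of_ne_nil (pvSplitDot_ne_nil r)
      rw [he] at e
      simp only [he, List.length_cons, List.all_cons] at ih
      simp only [e, pvG, if_neg hc, List.length_cons, List.all_cons]
      by_cases h2 : tl.length + 1 > 2
      · rw [if_pos (by simpa using h2)]
        rw [if_pos h2] at ih
        simp [← ih]
      · rw [if_neg (by simpa using h2)]
        rw [if_neg h2] at ih
        rw [← ih]
        simp only [List.headD_cons, List.tail_cons, Bool.and_assoc]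

theorem pvCore_eq (t : List Char) :
    pvCheckA t 0 (pvFindDot t 0) =
      (if (pvSplitDot t).length > 2 then false
       else (pvSplitDot t).all (fun part => part.all pvIsDig)) := by
  rw [pvCheckA_findDot t 0 le_rfl, pvSplitDot_g]

-- ===== VERDICT (by name: the statement is the Claim_ definition above) =====
theorem is_real_number_spec : Claim_equal_is_real_number := by
  intro s _
  unfold Spec_is_real_number is_real_number is_real_number_alt
  cases he : s.toList with
  | nil => simp
  | cons c r =>
    have h1 : ¬ (c :: r).length < 1 := by simp
    have h2 : (c :: r).isEmpty = false := by simp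
    simp only [h1, h2, Bool.false_eq_true, if_neg, not_false_eq_true]
    exact pvCore_eq _
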